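-- pv_equiv track=rewrite | github.com/Choi-jujuyeon/Python-CodingTest | 프로그래머스/0/120853. 컨트롤 제트/컨트롤 제트.py | solution
-- ===== SOURCE A (Python) =====
-- def solution(s):
--     s=s.split()
--     for i in range(len(s)):
--         if s[i]=='Z':
--             s[i-1],s[i]=0,0
--         else:
--             s[i]=int(s[i])
--     return sum(s)
-- ===== SOURCE B (Python) =====
-- def solution(s):
--     toks = s.split()
--     vals = [None if t == 'Z' else int(t) for t in toks]
--     total = 0
--     for i, v in enumerate(vals):
--         if v is not None and (i == len(vals) - 1 or toks[i + 1] != 'Z'):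
--             total += v
--     return total
-- ===== Notes on version B (the rewrite author's own statement) =====
-- stated objective: alternative
-- what changed: Replaces A's in-place backward zeroing of a mutable str/int token list by a pure two-pass scheme: parse every non-'Z' token up front, then sum each value whose following token is not 'Z'.
-- intended difference: When the first token is 'Z', A's s[i-1] assignment wraps to s[-1] and silently zeroes the LAST token (dropping its value and un-cancelling a trailing 'Z'), while B returns the intended sum in which 'Z' cancels only the previous number; D_ covers exactly the inputs where the two results differ. — e.g. on solution("Z 5"): A returns 0, B returns 5
-- outside the precondition, e.g. on solution('Z x'): A returns 0, B raises ValueError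
import Mathlib
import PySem

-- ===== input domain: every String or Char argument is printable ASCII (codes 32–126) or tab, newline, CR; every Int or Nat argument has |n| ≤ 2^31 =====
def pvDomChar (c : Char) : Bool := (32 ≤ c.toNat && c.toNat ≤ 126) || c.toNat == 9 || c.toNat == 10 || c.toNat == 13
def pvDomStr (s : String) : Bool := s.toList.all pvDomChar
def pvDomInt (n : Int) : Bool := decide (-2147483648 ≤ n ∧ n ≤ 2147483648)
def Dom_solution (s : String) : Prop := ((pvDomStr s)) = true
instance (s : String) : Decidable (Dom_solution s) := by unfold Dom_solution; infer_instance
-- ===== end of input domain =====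

-- B replaces A's in-place backward zeroing of the token list by a pure two-pass
-- forward look-ahead (parse all tokens, then sum each value whose successor token
-- is not 'Z'); equivalence is proved outside D_solution, where A's negative-index
-- wraparound on a leading 'Z' silently zeroes the LAST token instead of a previous one.

-- ===== PORT A =====
-- the mutable Python list holds str and int cells at once: model a cell as String ⊕ Int
def pvCellIsZ (c : String ⊕ Int) : Bool :=
  match c with
  | .inl t => t == "Z"      -- s[i] == 'Z' (an int cell never equals 'Z')
  | .inr _ => false

def pvCellInt (c : String ⊕ Int) : Int :=
  match c with
  | .inl t => (PySem.Int.ofStr? t).getD 0   -- int(str): none = ValueError, excluded by Pre_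
  | .inr v => v                             -- int(int) = itself

def pvCellVal (c : String ⊕ Int) : Int :=
  match c with
  | .inl _ => 0             -- unreachable at sum time: the loop has visited every index
  | .inr v => v

-- the loop body of A (closure-free helper; i is the Python index)
def pvStepA (l : List (String ⊕ Int)) (i : Int) : List (String ⊕ Int) :=
  if pvCellIsZ (PySem.List.pyGetD l i (Sum.inr 0)) then
    PySem.List.pySetD (PySem.List.pySetD l (i - 1) (Sum.inr 0)) i (Sum.inr 0)
  else
    PySem.List.pySetD l i (Sum.inr (pvCellInt (PySem.List.pyGetD l i (Sum.inr 0))))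

def solution (s : String) : Int :=
  let toks := PySem.Str.split₀ s
  let fin := (PySem.List.pyRange 0 (toks.length : Int) 1).foldl pvStepA (toks.map Sum.inl)
  (fin.map pvCellVal).sum

-- ===== PORT B =====
-- the loop body of B (toks and len(vals) passed explicitly)
def pvStepB (toks : List String) (nv : Int) (total : Int) (p : Int × Option Int) : Int :=
  match p.2 with
  | none => total
  | some v =>
      if p.1 == nv - 1 || !(PySem.List.pyGetD toks (p.1 + 1) "" == "Z") then total + v
      else total

def solution_alt (s : String) : Int :=
  let toks := PySem.Str.split₀ s
  let vals : List (Option Int) :=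
    toks.map (fun t => if t == "Z" then none else some ((PySem.Int.ofStr? t).getD 0))
  (PySem.List.enumerate vals).foldl (pvStepB toks (vals.length : Int)) 0

-- ===== PRECONDITION & SPEC =====
-- Pre_ excludes inputs with a token that is neither 'Z' nor an int literal: on almost all
-- of them A raises ValueError; when only the LAST token is bad and the FIRST is 'Z',
-- A's wraparound overwrites it before int() sees it and A returns, but B's eager parse
-- raises there, so those inputs are excluded too.
def Pre_solution (s : String) : Prop :=
  ∀ t ∈ PySem.Str.split₀ s, t = "Z" ∨ (PySem.Int.ofStr? t).isSome = true
instance (s : String) : Decidable (Pre_solution s) := by unfold Pre_solution; infer_instance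

def pvWitness_solution : String := "1 Z 3"

def pvIv (t : String) : Int := (PySem.Int.ofStr? t).getD 0

-- On inputs whose first token is 'Z', A's s[i-1] wraps to s[-1] and silently zeroes the
-- LAST token (so A returns a sum missing the last value, and keeps a value that a final
-- 'Z' should have cancelled), while B returns the intended sum in which 'Z' cancels the
-- previous number only; D_ is exactly where the two values differ.
def D_solution (s : String) : Prop :=
  let t := PySem.Str.split₀ s
  t.headD "" = "Z" ∧ pvIv (t.getD (t.length - (if t.getLastD "" = "Z" then 2 else 1)) "") ≠ 0
instance (s : String) : Decidable (D_solution s) := by unfold D_solution; infer_instance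

def Spec_solution (s : String) (out : Int) : Prop := ¬ D_solution s → out = solution_alt s
instance (s : String) (out : Int) : Decidable (Spec_solution s out) := by unfold Spec_solution; infer_instance

def pvDiffWitness_solution : String := "Z 5"
def pvDiffWitnessOut_solution : Int × Int := (0, 5)

-- ===== CLAIM (what is proved, stated in full; the proofs are below) =====
def Claim_unchanged_solution : Prop := ∀ (s : String), Dom_solution s → Pre_solution s → Spec_solution s (solution s)
def Claim_changed_solution : Prop := Dom_solution (pvDiffWitness_solution) ∧ Pre_solution (pvDiffWitness_solution) ∧ D_solution (pvDiffWitness_solution) ∧ solution (pvDiffWitness_solution) = pvDiffWitnessOut_solution.1 ∧ solution_alt (pvDiffWitness_solution) = pvDiffWitnessOut_solution.2 ∧ pvDiffWitnessOut_solution.1 ≠ pvDiffWitnessOut_solution.2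
def Claim_exact_solution : Prop := ∀ (s : String), Dom_solution s → Pre_solution s → D_solution s → solution s ≠ solution_alt s

-- ===== LEMMAS AND PROOFS =====

-- value of token j (0 if out of range or unparsable; Pre_ rules the latter out)
def pvTokVal (toks : List String) (j : Nat) : Int := (PySem.Int.ofStr? (toks.getD j "")).getD 0

-- the summand B contributes at index j
def pvBKeep (toks : List String) (j : Nat) : Int :=
  if toks.getD j "" = "Z" then 0
  else if j = toks.length - 1 ∨ toks.getD (j + 1) "" ≠ "Z" then pvTokVal toks j
  else 0

-- A's intermediate state after i loop iterations, first token ≠ 'Z' (cell at index j)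
def pvAState (toks : List String) (i j : Nat) : String ⊕ Int :=
  if j < i then
    Sum.inr (if toks.getD j "" = "Z" ∨ (j + 1 < i ∧ toks.getD (j + 1) "" = "Z") then 0
             else pvTokVal toks j)
  else Sum.inl (toks.getD j "")

-- A's intermediate state after i ≥ 1 iterations when the first token IS 'Z'
def pvZState (toks : List String) (i j : Nat) : String ⊕ Int :=
  if j = 0 ∨ j = toks.length - 1 then Sum.inr 0
  else if j < i then
    Sum.inr (if toks.getD j "" = "Z" ∨ (j + 1 < i ∧ toks.getD (j + 1) "" = "Z") then 0
             else pvTokVal toks j)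
  else Sum.inl (toks.getD j "")

lemma pv_map_eq_map_range {α β : Type} (xs : List α) (f : α → β) (d : α) :
    xs.map f = (List.range xs.length).map (fun j => f (xs.getD j d)) := by
  apply List.ext_getElem (by simp)
  intro k h1 h2
  simp [List.getD_eq_getElem?_getD, List.getElem?_eq_getElem (by simpa using h2)]

lemma pv_pySetD_natCast {α : Type} (xs : List α) (n : Nat) (v : α) (h : n < xs.length) :
    PySem.List.pySetD xs (n : Int) v = xs.set n v := by
  simp [PySem.List.pySetD, PySem.List.pySet?, PySem.List.pyIdx?, h]

lemma pv_pySetD_neg_one {α : Type} (xs : List α) (v : α) (h : xs ≠ []) :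
    PySem.List.pySetD xs (-1) v = xs.set (xs.length - 1) v := by
  have h1 : 0 < xs.length := List.length_pos_iff.mpr h
  simp only [PySem.List.pySetD, PySem.List.pySet?, PySem.List.pyIdx?]
  norm_num
  rw [if_pos (by omega)]
  rfl

lemma pv_set_map_range {β : Type} (f : Nat → β) (n m : Nat) (v : β) :
    ((List.range n).map f).set m v = (List.range n).map (fun j => if j = m then v else f j) := by
  apply List.ext_getElem (by simp)
  intro k h1 h2
  rw [List.getElem_set]
  simp only [List.getElem_map, List.getElem_range]
  split_ifs with hh hh2 <;> first | rfl | omega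

-- the invariant of A's loop when the first token is not 'Z'
lemma pv_invA (toks : List String) (h0 : toks.getD 0 "" ≠ "Z") :
    ∀ i, i ≤ toks.length →
      ((List.range i).map (fun k : Nat => (k : Int))).foldl pvStepA (toks.map Sum.inl) =
        (List.range toks.length).map (pvAState toks i) := by
  intro i
  induction i with
  | zero =>
    intro _
    rw [pv_map_eq_map_range toks Sum.inl ""]
    simp [pvAState]
  | succ i ih =>
    intro hsucc
    have hi : i < toks.length := by omega
    rw [List.range_succ, List.map_append, List.foldl_append, ih (by omega)]
    simp only [List.map_cons, List.map_nil, List.foldl_cons, List.foldl_nil]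
    unfold pvStepA
    rw [PySem.List.pyGetD_natCast, PySem.List.getD_map_range _ _ _ _ hi]
    have hs : pvAState toks i i = Sum.inl (toks.getD i "") := by simp [pvAState]
    rw [hs]
    by_cases hz : toks.getD i "" = "Z"
    · have hbz : pvCellIsZ (Sum.inl (toks.getD i "")) = true := by
        simp only [pvCellIsZ]; exact beq_iff_eq.mpr hz
      rw [if_pos hbz]
      have hi1 : 1 ≤ i := by
        rcases i with _ | i
        · exact absurd hz h0
        · omega
      have hii : i - 1 + 1 = i := by omega
      rw [show ((i : Int) - 1) = (((i - 1 : Nat)) : Int) by omega]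
      rw [pv_pySetD_natCast _ (i - 1) _ (by simp; omega), pv_set_map_range,
          pv_pySetD_natCast _ i _ (by simpa using hi), pv_set_map_range]
      apply List.map_congr_left
      intro j hj
      rw [List.mem_range] at hj
      by_cases h1 : j = i
      · subst h1
        simp_all [pvAState]
      · by_cases h2 : j = i - 1
        · subst h2
          have hne : ¬ (i - 1 = i) := by omega
          have hlt : i - 1 < i + 1 := by omega
          simp_all [pvAState]
        · by_cases h3 : j < i
          · have hc : (j + 1 < i) = (j + 1 < i + 1) := by
              apply propext; constructor <;> intro <;> omega
            simp only [if_neg h1, if_neg h2, pvAState, if_pos h3,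
              if_pos (show j < i + 1 by omega), hc]
          · simp only [if_neg h1, if_neg h2, pvAState, if_neg h3,
              if_neg (show ¬ j < i + 1 by omega)]
    · have hbz : pvCellIsZ (Sum.inl (toks.getD i "")) = false := by
        simp only [pvCellIsZ]; exact beq_eq_false_iff_ne.mpr hz
      rw [if_neg (show ¬ _ = true by rw [hbz]; simp)]
      rw [pv_pySetD_natCast _ i _ (by simpa using hi), pv_set_map_range]
      apply List.map_congr_left
      intro j hj
      rw [List.mem_range] at hj
      by_cases h1 : j = i
      · subst h1
        simp_all [pvAState, pvCellInt, pvTokVal]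
      · by_cases h3 : j < i
        · have hc : (toks.getD j "" = "Z" ∨ (j + 1 < i ∧ toks.getD (j + 1) "" = "Z")) ↔
              (toks.getD j "" = "Z" ∨ (j + 1 < i + 1 ∧ toks.getD (j + 1) "" = "Z")) := by
            by_cases hb : toks.getD (j + 1) "" = "Z"
            · by_cases hji : j + 1 = i
              · rw [hji] at hb; exact absurd hb hz
              · simp only [hb, and_true]; constructor <;> rintro (h | h)
                  <;> first | exact Or.inl h | exact Or.inr (by omega)
            · simp_all
          simp only [if_neg h1, pvAState, if_pos h3, if_pos (show j < i + 1 by omega)]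
          exact congrArg Sum.inr (if_congr hc rfl rfl)
        · simp only [if_neg h1, pvAState, if_neg h3, if_neg (show ¬ j < i + 1 by omega)]

-- the invariant of A's loop when the first token IS 'Z' (after the wraparound step)
lemma pv_invZ (toks : List String) (h0 : toks.getD 0 "" = "Z") (h2 : 2 ≤ toks.length) :
    ∀ i, 1 ≤ i → i ≤ toks.length - 1 →
      ((List.range i).map (fun k : Nat => (k : Int))).foldl pvStepA (toks.map Sum.inl) =
        (List.range toks.length).map (pvZState toks i) := by
  intro i
  induction i with
  | zero => intro h _; omega
  | succ i ih =>
    intro h1 hile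
    by_cases hi0 : i = 0
    · subst hi0
      rw [List.range_succ, List.range_zero]
      simp only [List.nil_append, List.map_cons, List.map_nil, List.foldl_cons, List.foldl_nil]
      rw [pv_map_eq_map_range toks Sum.inl ""]
      unfold pvStepA
      rw [PySem.List.pyGetD_natCast, PySem.List.getD_map_range _ _ _ _ (by omega)]
      rw [if_pos (show pvCellIsZ (Sum.inl (toks.getD 0 "")) = true by
        simp only [pvCellIsZ]; exact beq_iff_eq.mpr h0)]
      rw [show (((0 : Nat) : Int) - 1) = (-1 : Int) by simp]
      rw [pv_pySetD_neg_one _ _ (List.ne_nil_of_length_pos (by simp; omega))]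
      rw [List.length_map, List.length_range, pv_set_map_range,
          pv_pySetD_natCast _ 0 _ (by simp; omega), pv_set_map_range]
      apply List.map_congr_left
      intro j hj
      rw [List.mem_range] at hj
      by_cases hj0 : j = 0
      · subst hj0
        have : pvZState toks 1 0 = Sum.inr 0 := by
          simp [pvZState]
        rw [this, if_pos rfl]
      · by_cases hjl : j = toks.length - 1
        · have : pvZState toks 1 j = Sum.inr 0 := by
            simp only [pvZState]; rw [if_pos (Or.inr hjl)]
          rw [this, if_neg hj0, if_pos hjl]
        · rw [if_neg hj0, if_neg hjl]
          simp only [pvZState]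
          rw [if_neg (by omega), if_neg (by omega)]
    · have hi1' : 1 ≤ i := by omega
      rw [List.range_succ, List.map_append, List.foldl_append, ih hi1' (by omega)]
      simp only [List.map_cons, List.map_nil, List.foldl_cons, List.foldl_nil]
      unfold pvStepA
      rw [PySem.List.pyGetD_natCast, PySem.List.getD_map_range _ _ _ _ (by omega)]
      have hs : pvZState toks i i = Sum.inl (toks.getD i "") := by
        simp only [pvZState]
        rw [if_neg (by omega), if_neg (by omega)]
      rw [hs]
      by_cases hz : toks.getD i "" = "Z"
      · rw [if_pos (show pvCellIsZ (Sum.inl (toks.getD i "")) = true by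
          simp only [pvCellIsZ]; exact beq_iff_eq.mpr hz)]
        have hii : i - 1 + 1 = i := by omega
        rw [show ((i : Int) - 1) = (((i - 1 : Nat)) : Int) by omega]
        rw [pv_pySetD_natCast _ (i - 1) _ (by simp; omega), pv_set_map_range,
            pv_pySetD_natCast _ i _ (by simp; omega), pv_set_map_range]
        apply List.map_congr_left
        intro j hj
        rw [List.mem_range] at hj
        by_cases hj0 : j = 0 ∨ j = toks.length - 1
        · have hrhs : pvZState toks (i + 1) j = Sum.inr 0 := by
            simp only [pvZState]; rw [if_pos hj0]
          have hlhs : pvZState toks i j = Sum.inr 0 := by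
            simp only [pvZState]; rw [if_pos hj0]
          rw [hrhs]
          by_cases ha : j = i
          · rw [if_pos ha]
          · by_cases hb : j = i - 1
            · rw [if_neg ha, if_pos hb]
            · rw [if_neg ha, if_neg hb, hlhs]
        · rw [not_or] at hj0
          obtain ⟨hj0a, hj0b⟩ := hj0
          have hnotfirst : ¬ (j = 0 ∨ j = toks.length - 1) := by
            rintro (h | h) <;> [exact hj0a h; exact hj0b h]
          by_cases ha : j = i
          · subst ha
            rw [if_pos rfl]
            simp only [pvZState]
            rw [if_neg hnotfirst, if_pos (by omega), if_pos (Or.inl hz)]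
          · by_cases hb : j = i - 1
            · subst hb
              rw [if_neg ha, if_pos rfl]
              simp only [pvZState]
              rw [if_neg hnotfirst, if_pos (by omega),
                  if_pos (Or.inr ⟨by omega, by rw [hii]; exact hz⟩)]
            · rw [if_neg ha, if_neg hb]
              simp only [pvZState]
              by_cases h3 : j < i
              · have hc : (toks.getD j "" = "Z" ∨ (j + 1 < i ∧ toks.getD (j + 1) "" = "Z")) =
                    (toks.getD j "" = "Z" ∨ (j + 1 < i + 1 ∧ toks.getD (j + 1) "" = "Z")) := by
                  apply propext
                  constructor <;> rintro (h | ⟨ha', hb'⟩)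
                  · exact Or.inl h
                  · exact Or.inr ⟨by omega, hb'⟩
                  · exact Or.inl h
                  · exact Or.inr ⟨by omega, hb'⟩
                simp only [hc]
                rw [if_neg hnotfirst, if_neg hnotfirst, if_pos h3,
                    if_pos (show j < i + 1 from by omega)]
              · rw [if_neg hnotfirst, if_neg hnotfirst, if_neg h3,
                    if_neg (show ¬ j < i + 1 from by omega)]
      · rw [if_neg (show ¬ pvCellIsZ (Sum.inl (toks.getD i "")) = true by
          simp only [pvCellIsZ, beq_iff_eq]; exact hz)]
        rw [pv_pySetD_natCast _ i _ (by simp; omega), pv_set_map_range]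
        apply List.map_congr_left
        intro j hj
        rw [List.mem_range] at hj
        by_cases hj0 : j = 0 ∨ j = toks.length - 1
        · have hrhs : pvZState toks (i + 1) j = Sum.inr 0 := by
            simp only [pvZState]; rw [if_pos hj0]
          have hlhs : pvZState toks i j = Sum.inr 0 := by
            simp only [pvZState]; rw [if_pos hj0]
          rw [hrhs, if_neg (by omega), hlhs]
        · rw [not_or] at hj0
          obtain ⟨hj0a, hj0b⟩ := hj0
          have hnotfirst : ¬ (j = 0 ∨ j = toks.length - 1) := by
            rintro (h | h) <;> [exact hj0a h; exact hj0b h]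
          by_cases ha : j = i
          · subst ha
            rw [if_pos rfl]
            simp only [pvZState]
            rw [if_neg hnotfirst, if_pos (show j < j + 1 from by omega),
                if_neg (show ¬ (toks.getD j "" = "Z" ∨ (j + 1 < j + 1 ∧ toks.getD (j + 1) "" = "Z")) from by
                  rintro (h | ⟨ha', hb'⟩)
                  · exact hz h
                  · omega)]
            simp [pvCellInt, pvTokVal]
          · rw [if_neg ha]
            simp only [pvZState]
            by_cases h3 : j < i
            · have hc : (toks.getD j "" = "Z" ∨ (j + 1 < i ∧ toks.getD (j + 1) "" = "Z")) =
                  (toks.getD j "" = "Z" ∨ (j + 1 < i + 1 ∧ toks.getD (j + 1) "" = "Z")) := by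
                apply propext
                by_cases hb : toks.getD (j + 1) "" = "Z"
                · by_cases hji : j + 1 = i
                  · rw [hji] at hb; exact absurd hb hz
                  · simp only [hb, and_true]
                    constructor <;> rintro (h | h)
                      <;> first | exact Or.inl h | exact Or.inr (by omega)
                · simp_all
              simp only [hc]
              rw [if_neg hnotfirst, if_neg hnotfirst, if_pos h3,
                  if_pos (show j < i + 1 from by omega)]
            · rw [if_neg hnotfirst, if_neg hnotfirst, if_neg h3,
                  if_neg (show ¬ j < i + 1 from by omega)]

-- B's fold evaluates to the pvBKeep sum
lemma pv_alt_eq_sum (s : String) :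
    solution_alt s =
      ((List.range (PySem.Str.split₀ s).length).map (pvBKeep (PySem.Str.split₀ s))).sum := by
  simp only [solution_alt]
  set toks := PySem.Str.split₀ s with htoks
  set f : String → Option Int := fun t => if t == "Z" then none else some ((PySem.Int.ofStr? t).getD 0) with hf
  rw [PySem.List.foldl_congr_mem (g := fun acc p => acc +
      (match p.2 with
       | none => 0
       | some v => if p.1 == (((toks.map f).length : Nat) : Int) - 1 || !(PySem.List.pyGetD toks (p.1 + 1) "" == "Z") then v else 0)) _ _ _ ?_]
  · rw [PySem.List.foldl_add]
    rw [PySem.List.enumerate_eq_map_pyRange (toks.map f) none]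
    simp only [PySem.List.len_eq, List.length_map]
    rw [show ((toks.length : Int)) = ((toks.length : Nat) : Int) from rfl, PySem.List.pyRange_zero_natCast]
    rw [List.map_map, List.map_map]
    rw [zero_add]
    congr 1
    apply List.map_congr_left
    intro k hk
    rw [List.mem_range] at hk
    simp only [Function.comp]
    rw [PySem.List.pyGetD_natCast]
    rw [pv_map_eq_map_range toks f "", PySem.List.getD_map_range _ _ _ _ hk]
    rw [hf]
    by_cases hz : toks.getD k "" = "Z"
    · have hb : (toks.getD k "" == "Z") = true := beq_iff_eq.mpr hz
      simp only [hb, if_true, pvBKeep, if_pos hz]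
    · have hb : (toks.getD k "" == "Z") = false := beq_eq_false_iff_ne.mpr hz
      simp only [hb, Bool.false_eq_true, if_false]
      have h1 : ((k:Int) + 1) = (((k+1 : Nat)) : Int) := by push_cast; ring
      simp only [h1, PySem.List.pyGetD_natCast]
      have hc : ((k:Int) = (toks.length:Int) - 1) ↔ (k = toks.length - 1) := by omega
      simp only [pvBKeep, if_neg hz, pvTokVal]
      by_cases he : k = toks.length - 1 <;> by_cases hznext : toks.getD (k+1) "" = "Z" <;>
        simp [he, hznext, hc] <;> (intro hcontra _; exfalso; omega)
  · intro acc p hp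
    match hm : p.2 with
    | none => simp [pvStepB, hm]
    | some v =>
      simp only [pvStepB, hm, List.length_map]
      split_ifs <;> simp


-- A evaluates to the same sum when the first token is not 'Z'
lemma pv_a_eq_sum (s : String) (h0 : (PySem.Str.split₀ s).getD 0 "" ≠ "Z") :
    solution s =
      ((List.range (PySem.Str.split₀ s).length).map (pvBKeep (PySem.Str.split₀ s))).sum := by
  have hinv := pv_invA (PySem.Str.split₀ s) h0 (PySem.Str.split₀ s).length le_rfl
  simp only [solution]
  rw [PySem.List.pyRange_zero_natCast, hinv, List.map_map]
  clear hinv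
  apply congrArg List.sum
  apply List.map_congr_left
  intro j hj
  rw [List.mem_range] at hj
  set toks := PySem.Str.split₀ s with htoks
  simp only [Function.comp, pvAState, if_pos hj]
  by_cases hzj : toks.getD j "" = "Z"
  · rw [pvBKeep, if_pos hzj, if_pos (Or.inl hzj)]
    rfl
  · by_cases hl : j = toks.length - 1
    · rw [pvBKeep, if_neg hzj, if_pos (Or.inl hl),
        if_neg (show ¬ (toks.getD j "" = "Z" ∨ (j + 1 < toks.length ∧ toks.getD (j + 1) "" = "Z")) from by
          rintro (h | ⟨h1, h2⟩); exacts [hzj h, by omega])]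
      rfl
    · by_cases hzn : toks.getD (j + 1) "" = "Z"
      · rw [pvBKeep, if_neg hzj,
          if_neg (show ¬ (j = toks.length - 1 ∨ ¬ toks.getD (j + 1) "" = "Z") from by
            rintro (h | h); exacts [hl h, h hzn]),
          if_pos (Or.inr ⟨by omega, hzn⟩)]
        rfl
      · rw [pvBKeep, if_neg hzj, if_pos (Or.inr hzn),
          if_neg (show ¬ (toks.getD j "" = "Z" ∨ (j + 1 < toks.length ∧ toks.getD (j + 1) "" = "Z")) from by
            rintro (h | ⟨h1, h2⟩); exacts [hzj h, hzn h2])]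
        rfl

-- δ: how much B exceeds A when the first token is 'Z' (and n ≥ 2)
def pvDelta (toks : List String) : Int :=
  if toks.getD (toks.length - 1) "" = "Z" then
    (if 3 ≤ toks.length ∧ toks.getD (toks.length - 2) "" ≠ "Z"
     then -(pvTokVal toks (toks.length - 2)) else 0)
  else pvTokVal toks (toks.length - 1)

-- the loop leaves the state of pv_invZ at i = toks.length - 1 unchanged in its last step
lemma pv_invZ_full (toks : List String) (h0 : toks.getD 0 "" = "Z") (h2 : 2 ≤ toks.length) :
    ((List.range toks.length).map (fun k : Nat => (k : Int))).foldl pvStepA (toks.map Sum.inl) =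
      (List.range toks.length).map (pvZState toks (toks.length - 1)) := by
  have hcell : pvZState toks (toks.length - 1) (toks.length - 1) = Sum.inr 0 := by
    unfold pvZState
    rw [if_pos (Or.inr rfl)]
  conv_lhs => rw [show toks.length = (toks.length - 1) + 1 from by omega]
  rw [List.range_succ, List.map_append, List.foldl_append,
      pv_invZ toks h0 h2 (toks.length - 1) (by omega) le_rfl]
  simp only [List.map_cons, List.map_nil, List.foldl_cons, List.foldl_nil]
  unfold pvStepA
  rw [PySem.List.pyGetD_natCast, PySem.List.getD_map_range _ _ _ _ (by omega), hcell]
  rw [if_neg (show ¬ pvCellIsZ (Sum.inr 0) = true from by simp [pvCellIsZ])]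
  rw [pv_pySetD_natCast _ (toks.length - 1) _ (by simp; omega), pv_set_map_range]
  apply List.map_congr_left
  intro j hj
  rw [List.mem_range] at hj
  by_cases hlast : j = toks.length - 1
  · subst hlast
    rw [if_pos rfl, hcell]
    rfl
  · rw [if_neg hlast]

lemma pv_z_sum (s : String) (h0 : (PySem.Str.split₀ s).getD 0 "" = "Z")
    (h2 : 2 ≤ (PySem.Str.split₀ s).length) :
    solution s =
      ((List.range (PySem.Str.split₀ s).length).map
        (fun j => pvCellVal (pvZState (PySem.Str.split₀ s) ((PySem.Str.split₀ s).length - 1) j))).sum := by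
  simp only [solution]
  rw [PySem.List.pyRange_zero_natCast, pv_invZ_full _ h0 h2, List.map_map]
  rfl

lemma pv_z_diff (s : String) (h0 : (PySem.Str.split₀ s).getD 0 "" = "Z")
    (h2 : 2 ≤ (PySem.Str.split₀ s).length) :
    solution_alt s = solution s + pvDelta (PySem.Str.split₀ s) := by
  rw [pv_alt_eq_sum s, pv_z_sum s h0 h2]
  set toks := PySem.Str.split₀ s with htoks
  set n := toks.length with hn
  have hsplit : List.range n = List.range (n - 2) ++ [n - 2, n - 2 + 1] := by
    conv_lhs => rw [show n = (n - 2) + 2 from by omega]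
    rw [List.range_add]
    simp [List.range_succ]
  rw [hsplit, List.map_append, List.map_append, List.sum_append, List.sum_append]
  have hmid : ((List.range (n - 2)).map (pvBKeep toks)) =
      ((List.range (n - 2)).map (fun j => pvCellVal (pvZState toks (n - 1) j))) := by
    apply List.map_congr_left
    intro j hj
    rw [List.mem_range] at hj
    by_cases hj0 : j = 0
    · subst hj0
      rw [pvBKeep, if_pos h0]
      unfold pvZState
      rw [if_pos (Or.inl rfl)]
      rfl
    · unfold pvZState
      rw [if_neg (show ¬ (j = 0 ∨ j = n - 1) from by rintro (h | h) <;> omega),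
          if_pos (show j < n - 1 from by omega)]
      by_cases hzj : toks.getD j "" = "Z"
      · rw [pvBKeep, if_pos hzj, if_pos (Or.inl hzj)]
        rfl
      · by_cases hzn : toks.getD (j + 1) "" = "Z"
        · rw [pvBKeep, if_neg hzj,
            if_neg (show ¬ (j = n - 1 ∨ ¬ toks.getD (j + 1) "" = "Z") from by
              rintro (h | h); exacts [by omega, h hzn]),
            if_pos (Or.inr ⟨by omega, hzn⟩)]
          rfl
        · rw [pvBKeep, if_neg hzj, if_pos (Or.inr hzn),
            if_neg (show ¬ (toks.getD j "" = "Z" ∨ (j + 1 < n - 1 ∧ toks.getD (j + 1) "" = "Z")) from by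
              rintro (h | ⟨h1, h2⟩); exacts [hzj h, hzn h2])]
          rfl
  rw [hmid]
  have hlastz : pvCellVal (pvZState toks (n - 1) (n - 2 + 1)) = 0 := by
    unfold pvZState
    rw [if_pos (Or.inr (show n - 2 + 1 = n - 1 from by omega))]
    rfl
  simp only [List.map_cons, List.map_nil, List.sum_cons, List.sum_nil, hlastz]
  rw [show n - 2 + 1 = n - 1 from by omega]
  by_cases hn2 : n = 2
  · rw [show n - 2 = 0 from by omega]
    have ha0 : pvCellVal (pvZState toks (n - 1) 0) = 0 := by
      unfold pvZState
      rw [if_pos (Or.inl rfl)]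
      rfl
    rw [ha0, pvBKeep, if_pos h0, pvDelta]
    by_cases hlast : toks.getD (n - 1) "" = "Z"
    · rw [if_pos hlast, pvBKeep, if_pos (show toks.getD (n - 1) "" = "Z" from hlast),
        if_neg (show ¬ (3 ≤ n ∧ ¬ toks.getD (n - 2) "" = "Z") from by rintro ⟨h, _⟩; omega)]
      ring
    · rw [if_neg hlast, pvBKeep, if_neg hlast, if_pos (Or.inl rfl)]
      ring
  · have hv2 : pvCellVal (pvZState toks (n - 1) (n - 2)) =
        (if toks.getD (n - 2) "" = "Z" then 0 else pvTokVal toks (n - 2)) := by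
      unfold pvZState
      rw [if_neg (show ¬ (n - 2 = 0 ∨ n - 2 = n - 1) from by rintro (h | h) <;> omega),
          if_pos (show n - 2 < n - 1 from by omega)]
      by_cases hpen : toks.getD (n - 2) "" = "Z"
      · rw [if_pos hpen, if_pos (Or.inl hpen)]
        rfl
      · rw [if_neg hpen,
          if_neg (show ¬ (toks.getD (n - 2) "" = "Z" ∨ (n - 2 + 1 < n - 1 ∧ toks.getD (n - 2 + 1) "" = "Z")) from by
            rintro (h | ⟨h1, h2⟩); exacts [hpen h, by omega])]
        rfl
    rw [hv2, pvDelta]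
    by_cases hlast : toks.getD (n - 1) "" = "Z"
    · rw [if_pos hlast]
      by_cases hpen : toks.getD (n - 2) "" = "Z"
      · rw [if_pos hpen, pvBKeep, if_pos hpen, pvBKeep, if_pos hlast,
          if_neg (show ¬ (3 ≤ n ∧ ¬ toks.getD (n - 2) "" = "Z") from by rintro ⟨_, h⟩; exact h hpen)]
        ring
      · rw [if_neg hpen, pvBKeep, if_neg hpen,
          if_neg (show ¬ (n - 2 = n - 1 ∨ ¬ toks.getD (n - 2 + 1) "" = "Z") from by
            rintro (h | h); exacts [by omega, h (by rw [show n - 2 + 1 = n - 1 from by omega]; exact hlast)]),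
          pvBKeep, if_pos hlast,
          if_pos (show 3 ≤ n ∧ ¬ toks.getD (n - 2) "" = "Z" from ⟨by omega, hpen⟩)]
        ring
    · have hb2 : pvBKeep toks (n - 1) = pvTokVal toks (n - 1) := by
        rw [pvBKeep, if_neg hlast, if_pos (Or.inl rfl)]
      have hb1 : pvBKeep toks (n - 2) =
          (if toks.getD (n - 2) "" = "Z" then 0 else pvTokVal toks (n - 2)) := by
        by_cases hpen : toks.getD (n - 2) "" = "Z"
        · rw [pvBKeep, if_pos hpen, if_pos hpen]
        · rw [pvBKeep, if_neg hpen, if_neg hpen,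
            if_pos (show n - 2 = toks.length - 1 ∨ ¬ toks.getD (n - 2 + 1) "" = "Z" from
              Or.inr (by rw [show n - 2 + 1 = n - 1 from by omega]; exact hlast))]
      rw [if_neg hlast, hb1, hb2]
      ring

lemma pv_getLastD (t : List String) : t.getLastD "" = t.getD (t.length - 1) "" := by
  cases t with
  | nil => rfl
  | cons a tl =>
    rw [List.getLastD_eq_getLast?, List.getLast?_eq_getElem?, List.getD_eq_getElem?_getD]

lemma pv_D_iff (s : String) :
    D_solution s ↔
      2 ≤ (PySem.Str.split₀ s).length ∧ (PySem.Str.split₀ s).getD 0 "" = "Z" ∧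
        pvDelta (PySem.Str.split₀ s) ≠ 0 := by
  simp only [D_solution]
  set toks := PySem.Str.split₀ s with htoks
  have hhead : toks.headD "" = toks.getD 0 "" := by cases toks <;> rfl
  have hivz : pvIv "Z" = 0 := by decide
  rw [hhead, pv_getLastD toks]
  by_cases hlast : toks.getD (toks.length - 1) "" = "Z"
  · rw [if_pos hlast]
    constructor
    · rintro ⟨h0, hcond⟩
      have h2 : 2 ≤ toks.length := by
        rcases hx : toks with _ | ⟨a, _ | ⟨b, tl⟩⟩
        · rw [hx] at h0
          simp at h0
        · exfalso
          rw [hx] at h0 hcond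
          have ha : a = "Z" := by simpa using h0
          subst ha
          revert hcond
          decide
        · simp
      refine ⟨h2, h0, ?_⟩
      rw [pvDelta, if_pos hlast]
      have hpen : ¬ toks.getD (toks.length - 2) "" = "Z" := by
        intro h
        rw [h] at hcond
        exact hcond hivz
      have h3 : 3 ≤ toks.length := by
        by_contra hc
        have hn2 : toks.length = 2 := by omega
        rw [hn2] at hcond
        norm_num at hcond
        rw [List.getD_eq_getElem?_getD] at h0
        rw [h0] at hcond
        exact hcond hivz
      rw [if_pos ⟨h3, hpen⟩]
      simpa [pvTokVal, pvIv] using hcond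
    · rintro ⟨h2, h0, hδ⟩
      rw [pvDelta, if_pos hlast] at hδ
      refine ⟨h0, ?_⟩
      by_cases hp : 3 ≤ toks.length ∧ ¬ toks.getD (toks.length - 2) "" = "Z"
      · rw [if_pos hp] at hδ
        simpa [pvTokVal, pvIv] using hδ
      · rw [if_neg hp] at hδ
        exact absurd rfl hδ
  · rw [if_neg hlast]
    constructor
    · rintro ⟨h0, hcond⟩
      have h2 : 2 ≤ toks.length := by
        rcases hx : toks with _ | ⟨a, _ | ⟨b, tl⟩⟩
        · rw [hx] at h0
          simp at h0
        · exfalso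
          rw [hx] at h0 hlast
          have ha : a = "Z" := by simpa using h0
          subst ha
          exact hlast (by decide)
        · simp
      refine ⟨h2, h0, ?_⟩
      rw [pvDelta, if_neg hlast]
      exact hcond
    · rintro ⟨h2, h0, hδ⟩
      rw [pvDelta, if_neg hlast] at hδ
      exact ⟨h0, hδ⟩

-- toks = ["Z"]: A zeroes its single cell twice, B skips its single 'Z'
lemma pv_z_one (s : String) (h0 : (PySem.Str.split₀ s).getD 0 "" = "Z")
    (h1 : (PySem.Str.split₀ s).length < 2) :
    solution s = solution_alt s := by
  have hne : (PySem.Str.split₀ s) ≠ [] := by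
    intro h
    rw [h] at h0
    simp at h0
  have hlen1 : (PySem.Str.split₀ s).length = 1 := by
    have hpos := List.length_pos_iff.mpr hne
    omega
  obtain ⟨t, ht⟩ := List.length_eq_one_iff.mp hlen1
  have htz : t = "Z" := by
    rw [ht] at h0
    simpa using h0
  subst htz
  simp only [solution, solution_alt, ht]
  rfl

-- ===== VERDICT (by name: the statement is the Claim_ definition above) =====
theorem solution_spec : Claim_unchanged_solution := by
  intro s _hdom _hpre hnd
  by_cases h0 : (PySem.Str.split₀ s).getD 0 "" = "Z"
  · by_cases h2 : 2 ≤ (PySem.Str.split₀ s).length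
    · have hd := pv_z_diff s h0 h2
      have hz : pvDelta (PySem.Str.split₀ s) = 0 := by
        by_contra hnz
        exact hnd ((pv_D_iff s).mpr ⟨h2, h0, hnz⟩)
      omega
    · exact pv_z_one s h0 (by omega)
  · rw [pv_a_eq_sum s h0, pv_alt_eq_sum s]

theorem solution_changed : Claim_changed_solution := by
  unfold Claim_changed_solution; decide

theorem solution_tight : Claim_exact_solution := by
  intro s _hdom _hpre hD heq
  obtain ⟨h2, h0, hnz⟩ := (pv_D_iff s).mp hD
  have hd := pv_z_diff s h0 h2
  omega
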